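-- pv_equiv track=rewrite | github.com/asho-0/Aptly | bot/app/parsers/site/inberlinwohnen.py | _contains_zip_code
-- ===== SOURCE A (Python) =====
-- def _contains_zip_code(value: str) -> bool:
--     digits = 0
--     for char in value:
--         if char.isdigit():
--             digits += 1
--             if digits >= 5:
--                 return True
--         else:
--             digits = 0
--     return False
-- ===== SOURCE B (Python) =====
-- def _contains_zip_code(value: str) -> bool:
--     return any(value[i:i + 5].isdigit() for i in range(len(value) - 4))
-- ===== Notes on version B (the rewrite author's own statement) =====
-- stated objective: idiomatic
-- what changed: Replaces A's stateful single-pass counter-with-reset by a stateless sliding-window check: for every starting index, test whether the 5-character slice value[i:i+5] is all digits via str.isdigit.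
import Mathlib
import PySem

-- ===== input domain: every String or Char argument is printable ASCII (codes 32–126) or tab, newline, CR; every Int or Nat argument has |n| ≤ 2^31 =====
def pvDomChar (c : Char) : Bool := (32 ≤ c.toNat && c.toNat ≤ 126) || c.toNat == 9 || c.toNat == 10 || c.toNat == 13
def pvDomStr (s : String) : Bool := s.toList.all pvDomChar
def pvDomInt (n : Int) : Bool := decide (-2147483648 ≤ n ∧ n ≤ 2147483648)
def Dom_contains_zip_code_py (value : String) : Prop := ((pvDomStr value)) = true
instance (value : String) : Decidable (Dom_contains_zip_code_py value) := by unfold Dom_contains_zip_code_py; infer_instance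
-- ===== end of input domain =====

-- B replaces A's stateful counter-with-reset scan by a stateless sliding-window
-- check: value[i:i+5].isdigit() for every start i (idiomatic, same result).

-- ===== PORT A =====
-- the for-loop with the running `digits` counter and the early `return True`
def pvZipLoopA : List Char → Nat → Bool
  | [], _ => false
  | c :: cs, digits =>
    if PySem.Chars.isdigit c then
      if digits + 1 ≥ 5 then true else pvZipLoopA cs (digits + 1)
    else pvZipLoopA cs 0

def contains_zip_code_py (value : String) : Bool :=
  pvZipLoopA value.toList 0

-- ===== PORT B =====
-- any(value[i:i+5].isdigit() for i in range(len(value) - 4))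
def contains_zip_code_py_alt (value : String) : Bool :=
  (PySem.List.pyRange 0 (PySem.Str.len value - 4) 1).any
    (fun i => PySem.Str.strIsdigit (PySem.Str.slice value (some i) (some (i + 5))))

-- ===== PRECONDITION & SPEC =====
def Spec_contains_zip_code_py (value : String) (out : Bool) : Prop := out = contains_zip_code_py_alt value
instance (value : String) (out : Bool) : Decidable (Spec_contains_zip_code_py value out) := by unfold Spec_contains_zip_code_py; infer_instance

-- ===== CLAIM =====
def Claim_equal_contains_zip_code_py : Prop := ∀ (value : String), Dom_contains_zip_code_py value → Spec_contains_zip_code_py value (contains_zip_code_py value)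

-- ===== LEMMAS AND PROOFS =====
-- B on the List Char level, with Nat indices
def pvNatGood (cs : List Char) : Bool :=
  (List.range (cs.length - 4)).any (fun k => PySem.Chars.strIsdigit ((cs.drop k).take 5))

-- length of the maximal digit prefix
def pvLeadRun (cs : List Char) : Nat := (cs.takeWhile PySem.Chars.isdigit).length

theorem pvAlt_eq_natGood (value : String) :
    contains_zip_code_py_alt value = pvNatGood value.toList := by
  unfold contains_zip_code_py_alt pvNatGood
  rw [PySem.List.pyRange_one]
  have hn : (PySem.Str.len value - 4 - 0).toNat = value.toList.length - 4 := by
    rw [PySem.Str.len_eq]; omega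
  rw [hn]
  simp only [List.any_map]
  apply List.any_congr rfl
  intro k
  simp only [Function.comp_apply, zero_add, PySem.Str.strIsdigit_eq,
    PySem.Str.toList_slice, PySem.Chars.slice_eq_listSlice]
  have h5 : ((k : Int)) + 5 = ((k : Int)) + ((5 : Nat) : Int) := by norm_num
  rw [h5, PySem.List.slice_natCast_add]

theorem pvTakeWhile_ge {p : Char → Bool} (n : Nat) (cs : List Char)
    (hl : n ≤ cs.length) (h : (cs.take n).all p = true) : n ≤ (cs.takeWhile p).length := by
  induction cs generalizing n with
  | nil => simpa using hl
  | cons c cs ih =>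
    cases n with
    | zero => omega
    | succ m =>
      simp only [List.take_succ_cons, List.all_cons, Bool.and_eq_true] at h
      simp [h.1]
      have := ih m (by simpa using hl) h.2
      omega

theorem pvLeadRun_good (cs : List Char) (h : 5 ≤ pvLeadRun cs) : pvNatGood cs = true := by
  have hlen : 5 ≤ cs.length := le_trans h ((List.takeWhile_prefix (l := cs) PySem.Chars.isdigit).length_le)
  unfold pvNatGood
  rw [List.any_eq_true]
  refine ⟨0, by simp; omega, ?_⟩
  simp only [List.drop_zero]
  obtain ⟨t, ht⟩ := (List.takeWhile_prefix (p := PySem.Chars.isdigit) (l := cs))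
  unfold PySem.Chars.strIsdigit
  have htk : cs.take 5 = (cs.takeWhile PySem.Chars.isdigit).take 5 := by
    conv_lhs => rw [← ht]
    rw [List.take_append_of_le_length (by simpa [pvLeadRun] using h)]
  rw [htk]
  simp only [Bool.and_eq_true]
  constructor
  · simp only [Bool.not_eq_eq_eq_not]
    simp [List.take_eq_nil_iff]
    cases cs with
    | nil => simp at hlen
    | cons a l =>
      refine ⟨by simp, ?_⟩
      by_cases ha : PySem.Chars.isdigit a
      · simpa using ha
      · simp [pvLeadRun, ha] at h
  · rw [List.all_eq_true]
    intro x hx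
    exact List.mem_takeWhile_imp (List.mem_of_mem_take hx)

theorem pvNatGood_cons (c : Char) (cs : List Char) :
    pvNatGood (c :: cs) =
      ((decide (4 ≤ cs.length) && PySem.Chars.strIsdigit ((c :: cs).take 5)) || pvNatGood cs) := by
  unfold pvNatGood
  by_cases h4 : 4 ≤ cs.length
  · have hlen : (c :: cs).length - 4 = (cs.length - 4) + 1 := by simp; omega
    rw [hlen, List.range_succ_eq_map]
    simp [List.any_map, Function.comp_def, List.drop_succ_cons, h4]
  · have h1 : (c :: cs).length - 4 = 0 := by simp; omega
    have h2 : cs.length - 4 = 0 := by omega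
    rw [h1, h2]
    simp [h4]

theorem pvWin0_leadRun (c : Char) (cs : List Char)
    (h : PySem.Chars.strIsdigit ((c :: cs).take 5) = true) (hl : 4 ≤ cs.length) :
    4 ≤ pvLeadRun cs := by
  unfold PySem.Chars.strIsdigit at h
  simp only [List.take_succ_cons, Bool.and_eq_true, List.all_cons] at h
  exact pvTakeWhile_ge 4 cs hl h.2.2

theorem pvLoopA_eq (cs : List Char) :
    ∀ d : Nat, d < 5 → pvZipLoopA cs d = (pvNatGood cs || decide (5 ≤ d + pvLeadRun cs)) := by
  induction cs with
  | nil => intro d hd; simp [pvZipLoopA, pvNatGood, pvLeadRun]; omega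
  | cons c cs ih =>
    intro d hd
    rw [pvNatGood_cons]
    cases hc : PySem.Chars.isdigit c
    · -- non-digit: counter resets; the window at 0 fails at c; lead run is empty
      have hrun : pvLeadRun (c :: cs) = 0 := by simp [pvLeadRun, hc]
      have hwin : PySem.Chars.strIsdigit ((c :: cs).take 5) = false := by
        unfold PySem.Chars.strIsdigit
        simp [hc]
      rw [hrun, hwin]
      simp only [pvZipLoopA, hc, Bool.false_eq_true, if_false, Bool.and_false, Bool.false_or]
      rw [ih 0 (by omega)]
      by_cases h5 : 5 ≤ pvLeadRun cs
      · rw [pvLeadRun_good cs h5]; simp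
      · simp [h5]; omega
    · -- digit: counter bumps; lead run grows by one
      have hrun : pvLeadRun (c :: cs) = pvLeadRun cs + 1 := by
        simp [pvLeadRun, hc]
      by_cases h5 : d + 1 ≥ 5
      · have : pvZipLoopA (c :: cs) d = true := by simp [pvZipLoopA, hc, h5]
        rw [this, hrun]
        have : decide (5 ≤ d + (pvLeadRun cs + 1)) = true := by simp; omega
        simp [this]
      · have hstep : pvZipLoopA (c :: cs) d = pvZipLoopA cs (d + 1) := by
          simp [pvZipLoopA, hc, h5]
        rw [hstep, ih (d + 1) (by omega), hrun]
        by_cases hw : (decide (4 ≤ cs.length) && PySem.Chars.strIsdigit ((c :: cs).take 5)) = true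
        · -- the window at 0 succeeds: then the lead run alone already certifies 5 ≤ d+1+run
          rw [Bool.and_eq_true, decide_eq_true_eq] at hw
          have := pvWin0_leadRun c cs hw.2 hw.1
          have hX : decide (5 ≤ d + 1 + pvLeadRun cs) = true := by simp; omega
          have hX' : decide (5 ≤ d + (pvLeadRun cs + 1)) = true := by simp; omega
          simp [hX, hX']
        · rw [Bool.not_eq_true] at hw
          rw [hw]
          have : d + 1 + pvLeadRun cs = d + (pvLeadRun cs + 1) := by omega
          rw [this]
          simp

-- ===== VERDICT =====
theorem contains_zip_code_py_spec : Claim_equal_contains_zip_code_py := by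
  intro value _
  unfold Spec_contains_zip_code_py contains_zip_code_py
  rw [pvAlt_eq_natGood, pvLoopA_eq value.toList 0 (by omega)]
  by_cases h5 : 5 ≤ pvLeadRun value.toList
  · rw [pvLeadRun_good value.toList h5]; simp
  · have : decide (5 ≤ 0 + pvLeadRun value.toList) = false := by simp; omega
    rw [this]
    simp
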